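-- pv_equiv track=rewrite | github.com/chaszm/GreedyColoringMap | GreedyColoring.py | greedy_state_algorithm
-- ===== SOURCE A (Python) =====
-- def greedy_state_algorithm(graph, colors):
--     color_map = {}  # stores color of each state
--
--     # Sort states by the number of adjacent states
--     sorted_states = sorted(graph.keys(), key=lambda state: -len(graph[state]))
--
--     for state in sorted_states:
--
--         available_colors = set(colors)
--
--
--         # Check colors of adjacent states and removes them
--         for adj in graph[state]:
--             if adj in color_map:
--                 if color_map[adj] in available_colors:
--                     available_colors.remove(color_map[adj]) #removes
--
--
--
--         # Color state with lowest available color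
--         if available_colors:
--             color_map[state] = min(available_colors)
--
--     return color_map
-- ===== SOURCE B (Python) =====
-- def greedy_state_algorithm(graph, colors):
--     # Welsh-Powell style: outer loop over the palette, assigning one whole
--     # color class per pass, instead of A's per-state min over remaining colors.
--     order = sorted(graph, key=lambda s: -len(graph[s]))
--     color_map = {}
--     for color in sorted(set(colors)):
--         for state in order:
--             if state not in color_map and all(
--                     color_map.get(adj) != color for adj in graph[state]):
--                 color_map[state] = color
--     # present the mapping per state (same order as the states were considered)
--     return {s: color_map[s] for s in order if s in color_map}
-- ===== Notes on version B (the rewrite author's own statement) =====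
-- stated objective: alternative
-- what changed: B replaces A's vertex-major greedy (fresh set(colors) per state, remove neighbour colors, take min) with Welsh-Powell color-major passes: the outer loop runs over the sorted distinct palette and each pass gives that single color to every still-uncolored state none of whose neighbours already holds it; the result dict is then presented per state.
import Mathlib
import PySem

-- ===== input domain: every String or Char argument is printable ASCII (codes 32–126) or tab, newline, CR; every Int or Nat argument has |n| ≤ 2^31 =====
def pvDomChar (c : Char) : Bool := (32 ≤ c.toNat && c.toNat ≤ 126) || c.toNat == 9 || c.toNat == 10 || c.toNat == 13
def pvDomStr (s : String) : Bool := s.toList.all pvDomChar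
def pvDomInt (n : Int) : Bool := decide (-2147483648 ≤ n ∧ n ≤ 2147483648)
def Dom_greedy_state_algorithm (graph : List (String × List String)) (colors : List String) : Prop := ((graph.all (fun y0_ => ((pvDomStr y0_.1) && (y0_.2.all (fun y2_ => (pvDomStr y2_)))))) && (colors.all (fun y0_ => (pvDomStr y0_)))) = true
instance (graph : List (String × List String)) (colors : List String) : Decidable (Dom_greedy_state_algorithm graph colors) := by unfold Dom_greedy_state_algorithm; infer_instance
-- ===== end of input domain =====

-- B is Welsh–Powell color-major coloring (one pass per sorted distinct color),
-- proved equal (same return value, same dict order) to A's vertex-major greedy.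


-- ===== PORT A =====
-- available_colors after A's inner removal loop
def pvAvailA (g : PySem.Dict String (List String)) (colors : List String)
    (cm : PySem.Dict String String) (state : String) : List String :=
  (PySem.Dict.getD g state []).foldl (fun av adj =>
      match PySem.Dict.get? cm adj with
      | some c => if PySem.Set.contains av c then ((PySem.Set.remove? av c).getD av) else av
      | none => av)
    (PySem.Set.ofList colors)

-- one loop body of A: 'if available_colors: color_map[state] = min(available_colors)'
-- (min? is some exactly on a non-empty list, so the match IS that guard)
def pvStepA (g : PySem.Dict String (List String)) (colors : List String)
    (cm : PySem.Dict String String) (state : String) : PySem.Dict String String :=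
  match PySem.List.min? (pvAvailA g colors cm state) (fun c => c) with
  | some m => PySem.Dict.insert cm state m
  | none => cm

def greedy_state_algorithm (graph : List (String × List String)) (colors : List String) : List (String × String) :=
  let g : PySem.Dict String (List String) := PySem.Dict.ofList graph
  -- sorted(graph.keys(), key=lambda state: -len(graph[state])); graph[state]
  -- ported as getD g state [] — exact, every sorted key is a key of g
  let sorted_states := PySem.List.sorted (PySem.Dict.keys g) (fun s => -((PySem.Dict.getD g s []).length : Int)) false
  (sorted_states.foldl (pvStepA g colors) PySem.Dict.empty).items

-- ===== PORT B =====
-- B's inner loop body for one color: 'if state not in color_map and all(...)'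
def pvStepW (g : PySem.Dict String (List String)) (color : String)
    (cm : PySem.Dict String String) (state : String) : PySem.Dict String String :=
  if !(PySem.Dict.contains cm state)
      && (PySem.Dict.getD g state []).all (fun adj => !(PySem.Dict.get? cm adj == some color))
  then PySem.Dict.insert cm state color else cm

-- one Welsh–Powell pass: give 'color' to every state it still fits
def pvPassB (g : PySem.Dict String (List String)) (order : List String)
    (cm : PySem.Dict String String) (color : String) : PySem.Dict String String :=
  order.foldl (pvStepW g color) cm

def greedy_state_algorithm_alt (graph : List (String × List String)) (colors : List String) : List (String × String) :=
  let g : PySem.Dict String (List String) := PySem.Dict.ofList graph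
  let order := PySem.List.sorted (PySem.Dict.keys g) (fun s => -((PySem.Dict.getD g s []).length : Int)) false
  let cm := (PySem.List.sorted (PySem.Set.ofList colors) (fun c => c) false).foldl (pvPassB g order) PySem.Dict.empty
  -- {s: color_map[s] for s in order if s in color_map}
  (order.foldl (fun d s =>
      match PySem.Dict.get? cm s with
      | some c => PySem.Dict.insert d s c
      | none => d) PySem.Dict.empty).items

-- ===== PRECONDITION & SPEC =====
def Spec_greedy_state_algorithm (graph : List (String × List String)) (colors : List String) (out : List (String × String)) : Prop := out = greedy_state_algorithm_alt graph colors
instance (graph : List (String × List String)) (colors : List String) (out : List (String × String)) : Decidable (Spec_greedy_state_algorithm graph colors out) := by unfold Spec_greedy_state_algorithm; infer_instance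

-- ===== CLAIM (what is proved, stated in full; the proofs are below) =====
def Claim_equal_greedy_state_algorithm : Prop := ∀ (graph : List (String × List String)) (colors : List String), Dom_greedy_state_algorithm graph colors → Spec_greedy_state_algorithm graph colors (greedy_state_algorithm graph colors)

-- ===== LEMMAS AND PROOFS =====

-- membership in (and Nodup of) A's available set after the removal loop
theorem pv_memA (cm : PySem.Dict String String) (l : List String) (av : List String)
    (hnd : av.Nodup) :
    (l.foldl (fun av adj =>
      match PySem.Dict.get? cm adj with
      | some c => if PySem.Set.contains av c then ((PySem.Set.remove? av c).getD av) else av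
      | none => av) av).Nodup ∧
    (∀ x, x ∈ l.foldl (fun av adj =>
      match PySem.Dict.get? cm adj with
      | some c => if PySem.Set.contains av c then ((PySem.Set.remove? av c).getD av) else av
      | none => av) av ↔ x ∈ av ∧ ¬ ∃ a ∈ l, PySem.Dict.get? cm a = some x) := by
  induction l generalizing av with
  | nil => simpa using hnd
  | cons a t ih =>
    cases h : PySem.Dict.get? cm a with
    | none =>
      simp only [List.foldl_cons, h]
      obtain ⟨h1, h2⟩ := ih av hnd
      refine ⟨h1, fun x => ?_⟩
      rw [h2]
      simp only [List.mem_cons]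
      constructor
      · rintro ⟨hx, hn⟩
        refine ⟨hx, ?_⟩
        rintro ⟨b, (rfl | hb), he⟩
        · rw [h] at he; cases he
        · exact hn ⟨b, hb, he⟩
      · rintro ⟨hx, hn⟩
        exact ⟨hx, fun ⟨b, hb, he⟩ => hn ⟨b, Or.inr hb, he⟩⟩
    | some c =>
      simp only [List.foldl_cons, h]
      have hstep : (if PySem.Set.contains av c then ((PySem.Set.remove? av c).getD av) else av)
          = if c ∈ av then PySem.Set.discard av c else av := by
        by_cases hc : c ∈ av
        · have h1 : PySem.Set.contains av c = true := by
            simp [PySem.Set.contains_eq_listContains, hc]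
          simp [hc, PySem.Set.remove?]
        · have h1 : PySem.Set.contains av c = false := by
            simp [PySem.Set.contains_eq_listContains, hc]
          simp [hc]
      rw [hstep]
      have hmem : ∀ x, x ∈ (if c ∈ av then PySem.Set.discard av c else av) ↔ x ∈ av ∧ x ≠ c := by
        intro x
        by_cases hc : c ∈ av
        · simp [hc, PySem.Set.mem_discard]
        · simp only [if_neg hc]
          constructor
          · intro hx; exact ⟨hx, fun e => hc (e ▸ hx)⟩
          · exact fun ⟨hx, _⟩ => hx
      have hnd' : (if c ∈ av then PySem.Set.discard av c else av).Nodup := by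
        by_cases hc : c ∈ av
        · simpa [hc] using PySem.Set.nodup_discard av c hnd
        · simpa [hc] using hnd
      obtain ⟨h1, h2⟩ := ih _ hnd'
      refine ⟨h1, fun x => ?_⟩
      rw [h2, hmem]
      simp only [List.mem_cons]
      constructor
      · rintro ⟨⟨hx, hne⟩, hn⟩
        refine ⟨hx, ?_⟩
        rintro ⟨b, (rfl | hb), he⟩
        · rw [h] at he; cases he; exact hne rfl
        · exact hn ⟨b, hb, he⟩
      · rintro ⟨hx, hn⟩
        refine ⟨⟨hx, fun e => hn ⟨a, Or.inl rfl, e ▸ h⟩⟩, fun ⟨b, hb, he⟩ => hn ⟨b, Or.inr hb, he⟩⟩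

-- x is available for 'state' iff it is a color no already-colored neighbour holds
theorem pv_mem_availA (g : PySem.Dict String (List String)) (colors : List String)
    (cm : PySem.Dict String String) (state : String) (x : String) :
    x ∈ pvAvailA g colors cm state ↔
      x ∈ colors ∧ ¬ ∃ a ∈ PySem.Dict.getD g state [], PySem.Dict.get? cm a = some x := by
  have h := (pv_memA cm (PySem.Dict.getD g state []) (PySem.Set.ofList colors)
    (PySem.Set.nodup_ofList colors)).2 x
  rw [pvAvailA, h, PySem.Set.mem_ofList]

-- the blocking condition at 'state', relative to a partial coloring cm
def pvFree (g : PySem.Dict String (List String)) (cm : PySem.Dict String String)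
    (state c : String) : Prop :=
  ¬ ∃ a ∈ PySem.Dict.getD g state [], PySem.Dict.get? cm a = some c

-- what A's min over the available set returns, characterised
theorem pv_minA_some (g : PySem.Dict String (List String)) (colors : List String)
    (cm : PySem.Dict String String) (state b : String)
    (h : PySem.List.min? (pvAvailA g colors cm state) (fun c => c) = some b) :
    b ∈ colors ∧ pvFree g cm state b ∧ ∀ c ∈ colors, pvFree g cm state c → b ≤ c := by
  have hb := PySem.List.min?_mem h
  rw [pv_mem_availA] at hb
  refine ⟨hb.1, hb.2, fun c hc hf => ?_⟩
  exact PySem.List.min?_isMin h c ((pv_mem_availA g colors cm state c).mpr ⟨hc, hf⟩)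

theorem pv_minA_of (g : PySem.Dict String (List String)) (colors : List String)
    (cm : PySem.Dict String String) (state b : String)
    (hb : b ∈ colors) (hf : pvFree g cm state b)
    (hmin : ∀ c ∈ colors, pvFree g cm state c → b ≤ c) :
    PySem.List.min? (pvAvailA g colors cm state) (fun c => c) = some b := by
  have hbav : b ∈ pvAvailA g colors cm state := (pv_mem_availA g colors cm state b).mpr ⟨hb, hf⟩
  cases hm : PySem.List.min? (pvAvailA g colors cm state) (fun c => c) with
  | none =>
    rw [PySem.List.min?_eq_none_iff] at hm
    rw [hm] at hbav; cases hbav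
  | some m =>
    have hmav := PySem.List.min?_mem hm
    rw [pv_mem_availA] at hmav
    have h1 : b ≤ m := hmin m hmav.1 hmav.2
    have h2 : m ≤ b := PySem.List.min?_isMin hm b hbav
    rw [le_antisymm h2 h1]

-- a fold whose step only touches its own key leaves other keys' lookups alone
theorem pv_fold_stable (f : PySem.Dict String String → String → PySem.Dict String String)
    (hf : ∀ cm s t, t ≠ s → (f cm s).get? t = cm.get? t) :
    ∀ (l : List String) (cm : PySem.Dict String String) (t : String), t ∉ l →
      (l.foldl f cm).get? t = cm.get? t := by
  intro l
  induction l with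
  | nil => intro cm t _; rfl
  | cons a r ih =>
    intro cm t ht
    simp only [List.mem_cons, not_or] at ht
    rw [List.foldl_cons, ih (f cm a) t ht.2, hf cm a t ht.1]

theorem pv_stepA_stable (g : PySem.Dict String (List String)) (colors : List String) :
    ∀ cm s t, t ≠ s → (pvStepA g colors cm s).get? t = cm.get? t := by
  intro cm s t hne
  rw [pvStepA]
  cases PySem.List.min? (pvAvailA g colors cm s) (fun c => c) with
  | some m => exact PySem.Dict.get?_insert_of_ne cm m hne
  | none => rfl

-- keys a fold can change are keys of the list it folds over
theorem pv_fold_dom (f : PySem.Dict String String → String → PySem.Dict String String)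
    (hf : ∀ cm s t, (f cm s).get? t ≠ cm.get? t → t = s) :
    ∀ (l : List String) (cm : PySem.Dict String String) (t : String),
      (l.foldl f cm).get? t ≠ cm.get? t → t ∈ l := by
  intro l
  induction l with
  | nil => intro cm t h; exact absurd rfl h
  | cons a r ih =>
    intro cm t h
    by_cases h2 : (r.foldl f (f cm a)).get? t = (f cm a).get? t
    · rw [List.foldl_cons, h2] at h
      exact List.mem_cons.mpr (Or.inl (hf cm a t h))
    · exact List.mem_cons.mpr (Or.inr (ih (f cm a) t h2))

theorem pv_stepA_dom (g : PySem.Dict String (List String)) (colors : List String) :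
    ∀ cm s t, (pvStepA g colors cm s).get? t ≠ cm.get? t → t = s := by
  intro cm s t h
  by_contra hne
  exact h (pv_stepA_stable g colors cm s t hne)

-- values A assigns come from the color list
theorem pv_foldA_values (g : PySem.Dict String (List String)) (colors : List String) :
    ∀ (l : List String) (cm : PySem.Dict String String) (t v : String),
      (l.foldl (pvStepA g colors) cm).get? t = some v →
      cm.get? t = some v ∨ v ∈ colors := by
  intro l
  induction l with
  | nil => intro cm t v h; exact Or.inl h
  | cons a r ih =>
    intro cm t v h
    rw [List.foldl_cons] at h
    rcases ih (pvStepA g colors cm a) t v h with h2 | h2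
    · rw [pvStepA] at h2
      cases hm : PySem.List.min? (pvAvailA g colors cm a) (fun c => c) with
      | some m =>
        rw [hm] at h2
        by_cases he : t = a
        · subst he
          rw [PySem.Dict.get?_insert_self] at h2
          cases h2
          exact Or.inr (pv_minA_some g colors cm _ _ hm).1
        · rw [PySem.Dict.get?_insert_of_ne cm m he] at h2
          exact Or.inl h2
      | none => rw [hm] at h2; exact Or.inl h2
    · exact Or.inr h2

-- ===== A's fold characterised at a split point =====

-- A's final color of s is the min of the colors its earlier neighbours left free
theorem pv_A_char (g : PySem.Dict String (List String)) (colors : List String)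
    (l₁ l₂ : List String) (s : String) (hnd : (l₁ ++ s :: l₂).Nodup) :
    ((l₁ ++ s :: l₂).foldl (pvStepA g colors) PySem.Dict.empty).get? s
      = PySem.List.min? (pvAvailA g colors (l₁.foldl (pvStepA g colors) PySem.Dict.empty) s) (fun c => c) := by
  have hs2 : s ∉ l₂ := by
    have := (List.nodup_append.mp hnd).2.1
    exact (List.nodup_cons.mp this).1
  rw [List.foldl_append, List.foldl_cons,
    pv_fold_stable (pvStepA g colors) (pv_stepA_stable g colors) l₂ _ s hs2]
  set cmPre := l₁.foldl (pvStepA g colors) PySem.Dict.empty with hcmPre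
  cases hm : PySem.List.min? (pvAvailA g colors cmPre s) (fun c => c) with
  | some m =>
    rw [pvStepA, hm]
    exact PySem.Dict.get?_insert_self cmPre s m
  | none =>
    rw [pvStepA, hm]
    have hs1 : s ∉ l₁ := fun h => (List.disjoint_of_nodup_append hnd) h (List.mem_cons_self)
    rw [hcmPre, pv_fold_stable (pvStepA g colors) (pv_stepA_stable g colors) l₁ _ s hs1]
    exact PySem.Dict.get?_empty s

-- the prefix fold's entries are exactly the final entries at prefix states
theorem pv_A_pre (g : PySem.Dict String (List String)) (colors : List String)
    (l₁ l₂ : List String) (hnd : (l₁ ++ l₂).Nodup) (t v : String) :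
    (l₁.foldl (pvStepA g colors) PySem.Dict.empty).get? t = some v ↔
      t ∈ l₁ ∧ ((l₁ ++ l₂).foldl (pvStepA g colors) PySem.Dict.empty).get? t = some v := by
  constructor
  · intro h
    have ht : t ∈ l₁ := by
      apply pv_fold_dom (pvStepA g colors) (pv_stepA_dom g colors) l₁ PySem.Dict.empty t
      rw [h, PySem.Dict.get?_empty]
      simp
    have ht2 : t ∉ l₂ := fun h2 => (List.disjoint_of_nodup_append hnd) ht h2
    refine ⟨ht, ?_⟩
    rw [List.foldl_append,
      pv_fold_stable (pvStepA g colors) (pv_stepA_stable g colors) l₂ _ t ht2, h]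
  · rintro ⟨ht, h⟩
    have ht2 : t ∉ l₂ := fun h2 => (List.disjoint_of_nodup_append hnd) ht h2
    rw [List.foldl_append,
      pv_fold_stable (pvStepA g colors) (pv_stepA_stable g colors) l₂ _ t ht2] at h
    exact h

-- ===== the Welsh–Powell pass invariant =====

-- after the pass prefix l₁ for color p (with smaller palette Pk already done),
-- the dict holds CMA's entries with value in Pk, plus the value-p entries at l₁
theorem pv_pass_inv (g : PySem.Dict String (List String)) (colors : List String)
    (S : List String) (hndS : S.Nodup) (Pk : List String) (p : String)
    (hPk : ∀ v, v ∈ Pk ↔ v ∈ colors ∧ v < p) (hp : p ∈ colors) :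
    ∀ (l₂ l₁ : List String) (cm : PySem.Dict String String), S = l₁ ++ l₂ →
    (∀ t v, cm.get? t = some v ↔
      (S.foldl (pvStepA g colors) PySem.Dict.empty).get? t = some v ∧ (v ∈ Pk ∨ (v = p ∧ t ∈ l₁))) →
    ∀ t v, (l₂.foldl (pvStepW g p) cm).get? t = some v ↔
      (S.foldl (pvStepA g colors) PySem.Dict.empty).get? t = some v ∧ (v ∈ Pk ∨ (v = p ∧ t ∈ l₁ ++ l₂)) := by
  intro l₂
  induction l₂ with
  | nil =>
    intro l₁ cm hS hcm t v
    simpa using hcm t v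
  | cons s r ih =>
    intro l₁ cm hS hcm
    have hndsplit : (l₁ ++ s :: r).Nodup := hS ▸ hndS
    have hs1 : s ∉ l₁ := fun h =>
      (List.disjoint_of_nodup_append hndsplit) h List.mem_cons_self
    set CMA := S.foldl (pvStepA g colors) PySem.Dict.empty with hCMA
    set cmPre := l₁.foldl (pvStepA g colors) PySem.Dict.empty with hcmPre
    have hchar : CMA.get? s
        = PySem.List.min? (pvAvailA g colors cmPre s) (fun c => c) := by
      rw [hCMA, hS, hcmPre]; exact pv_A_char g colors l₁ r s hndsplit
    have hpre : ∀ t v, cmPre.get? t = some v ↔ t ∈ l₁ ∧ CMA.get? t = some v := by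
      intro t v
      rw [hCMA, hS, hcmPre]
      exact pv_A_pre g colors l₁ (s :: r) hndsplit t v
    have hpnot : p ∉ Pk := fun h => lt_irrefl p ((hPk p).mp h).2
    -- the pass condition at s holds iff A finally colors s with p
    have hcond : ((!(PySem.Dict.contains cm s))
        && (PySem.Dict.getD g s []).all (fun adj => !(PySem.Dict.get? cm adj == some p))) = true
        ↔ CMA.get? s = some p := by
      constructor
      · intro hC
        obtain ⟨h1, h2⟩ := Bool.and_eq_true_iff.mp hC
        have hnone : cm.get? s = none := by
          rw [PySem.Dict.contains_eq_isSome_get?] at h1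
          cases hcs : cm.get? s with
          | none => rfl
          | some w => rw [hcs] at h1; simp at h1
        have hall : ∀ a ∈ PySem.Dict.getD g s [], cm.get? a ≠ some p := by
          intro a ha he
          have := List.all_eq_true.mp h2 a ha
          rw [he] at this; simp at this
        -- p is free at s relative to the prefix coloring
        have hfree : pvFree g cmPre s p := by
          rintro ⟨a, ha, hav⟩
          obtain ⟨ha1, hA⟩ := (hpre a p).mp hav
          exact hall a ha ((hcm a p).mpr ⟨hA, Or.inr ⟨rfl, ha1⟩⟩)
        have hnoPk : ∀ v ∈ Pk, CMA.get? s ≠ some v := by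
          intro v hv he
          have : cm.get? s = some v := (hcm s v).mpr ⟨he, Or.inl hv⟩
          rw [this] at hnone; cases hnone
        -- p is minimal among free colors: any smaller free color would be in Pk
        rw [hchar]
        apply pv_minA_of g colors cmPre s p hp hfree
        intro c hc hcf
        by_contra hlt
        rw [not_le] at hlt
        have hcav : c ∈ pvAvailA g colors cmPre s :=
          (pv_mem_availA g colors cmPre s c).mpr ⟨hc, hcf⟩
        cases hm : PySem.List.min? (pvAvailA g colors cmPre s) (fun x => x) with
        | none =>
          rw [PySem.List.min?_eq_none_iff] at hm
          rw [hm] at hcav; cases hcav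
        | some m =>
          obtain ⟨hmc, hmf, _⟩ := pv_minA_some g colors cmPre s m hm
          have hmle : m ≤ c := PySem.List.min?_isMin hm c hcav
          have : m ∈ Pk := (hPk m).mpr ⟨hmc, lt_of_le_of_lt hmle hlt⟩
          exact hnoPk m this (hchar.trans hm)
      · intro hAs
        obtain ⟨_, hfree, _⟩ := pv_minA_some g colors cmPre s p (hchar ▸ hAs)
        rw [Bool.and_eq_true]
        constructor
        · have hnone : cm.get? s = none := by
            cases hv : cm.get? s with
            | none => rfl
            | some v =>
              obtain ⟨hA, hvp⟩ := (hcm s v).mp hv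
              rw [hAs] at hA
              cases hA
              rcases hvp with h | ⟨_, h⟩
              · exact absurd h hpnot
              · exact absurd h hs1
          rw [PySem.Dict.contains_eq_isSome_get?, hnone]
          rfl
        · rw [List.all_eq_true]
          intro a ha
          cases hav : PySem.Dict.get? cm a with
          | none => simp
          | some w =>
            obtain ⟨hAa, hw⟩ := (hcm a w).mp hav
            by_cases hwp : w = p
            · subst hwp
              rcases hw with h | ⟨_, h⟩
              · exact absurd h hpnot
              · exact absurd ⟨a, ha, (hpre a w).mpr ⟨h, hAa⟩⟩ hfree
            · simp [hwp]
    -- one step, then the induction hypothesis with prefix l₁ ++ [s]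
    have hS' : S = (l₁ ++ [s]) ++ r := by rw [hS, List.append_assoc]; rfl
    have hstep : ∀ t v, (pvStepW g p cm s).get? t = some v ↔
        CMA.get? t = some v ∧ (v ∈ Pk ∨ (v = p ∧ t ∈ l₁ ++ [s])) := by
      intro t v
      rw [pvStepW]
      by_cases hC : ((!(PySem.Dict.contains cm s))
          && (PySem.Dict.getD g s []).all (fun adj => !(PySem.Dict.get? cm adj == some p))) = true
      · rw [if_pos hC]
        have hAs := hcond.mp hC
        by_cases hts : t = s
        · subst hts
          rw [PySem.Dict.get?_insert_self]
          constructor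
          · intro h; cases h
            exact ⟨hAs, Or.inr ⟨rfl, by simp⟩⟩
          · rintro ⟨hA, _⟩
            rw [hAs] at hA; cases hA; rfl
        · rw [PySem.Dict.get?_insert_of_ne cm p hts, hcm t v]
          have hmem : t ∈ l₁ ++ [s] ↔ t ∈ l₁ := by simp [hts]
          rw [hmem]
      · rw [if_neg hC]
        rw [hcm t v]
        have hAs : CMA.get? s ≠ some p := fun h => hC (hcond.mpr h)
        constructor
        · rintro ⟨hA, h⟩
          refine ⟨hA, ?_⟩
          rcases h with h | ⟨rfl, h⟩
          · exact Or.inl h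
          · exact Or.inr ⟨rfl, by simp [h]⟩
        · rintro ⟨hA, h⟩
          refine ⟨hA, ?_⟩
          rcases h with h | ⟨rfl, h⟩
          · exact Or.inl h
          · rcases (by simpa using h : t ∈ l₁ ∨ t = s) with h2 | rfl
            · exact Or.inr ⟨rfl, h2⟩
            · exact absurd hA hAs
    intro t v
    rw [List.foldl_cons, ih (l₁ ++ [s]) (pvStepW g p cm s) hS' hstep t v]
    have hmm : (l₁ ++ [s]) ++ r = l₁ ++ s :: r := by simp
    rw [hmm]

-- ===== the outer loop over the sorted distinct palette =====

theorem pv_outer (g : PySem.Dict String (List String)) (colors : List String)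
    (S : List String) (hndS : S.Nodup) :
    ∀ (l₂ l₁ : List String) (cm : PySem.Dict String String),
    PySem.List.sorted (PySem.Set.ofList colors) (fun c => c) false = l₁ ++ l₂ →
    (∀ t v, cm.get? t = some v ↔
      (S.foldl (pvStepA g colors) PySem.Dict.empty).get? t = some v ∧ v ∈ l₁) →
    ∀ t v, (l₂.foldl (pvPassB g S) cm).get? t = some v ↔
      (S.foldl (pvStepA g colors) PySem.Dict.empty).get? t = some v ∧ v ∈ l₁ ++ l₂ := by
  intro l₂
  induction l₂ with
  | nil => intro l₁ cm _ hcm t v; simpa using hcm t v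
  | cons p r ih =>
    intro l₁ cm hP hcm
    have hPlt : (PySem.List.sorted (PySem.Set.ofList colors) (fun c => c) false).Pairwise (· < ·) :=
      PySem.List.sorted_ofList_pairwise_lt colors
    have hPmem : ∀ v, v ∈ PySem.List.sorted (PySem.Set.ofList colors) (fun c => c) false ↔ v ∈ colors := by
      intro v
      rw [PySem.List.mem_sorted, PySem.Set.mem_ofList]
    have hp : p ∈ colors := (hPmem p).mp (by rw [hP]; simp)
    rw [hP] at hPlt
    have hd := List.pairwise_append.mp hPlt
    have hPk : ∀ v, v ∈ l₁ ↔ v ∈ colors ∧ v < p := by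
      intro v
      constructor
      · intro hv
        refine ⟨(hPmem v).mp (by rw [hP]; exact List.mem_append_left _ hv), ?_⟩
        exact hd.2.2 v hv p List.mem_cons_self
      · rintro ⟨hvc, hvp⟩
        have hvP : v ∈ l₁ ++ p :: r := by rw [← hP]; exact (hPmem v).mpr hvc
        rcases List.mem_append.mp hvP with h | h
        · exact h
        · rcases List.mem_cons.mp h with rfl | h2
          · exact absurd hvp (lt_irrefl v)
          · have hpv : p < v := (List.pairwise_cons.mp hd.2.1).1 v h2
            exact absurd hvp (asymm hpv)
    -- one whole pass for color p
    have hpass := pv_pass_inv g colors S hndS l₁ p hPk hp S [] cm rfl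
      (by intro t v; rw [hcm t v]; simp)
    have hstep : ∀ t v, (pvPassB g S cm p).get? t = some v ↔
        (S.foldl (pvStepA g colors) PySem.Dict.empty).get? t = some v ∧ v ∈ l₁ ++ [p] := by
      intro t v
      rw [pvPassB, hpass t v]
      constructor
      · rintro ⟨hA, h⟩
        refine ⟨hA, ?_⟩
        rcases h with h | ⟨rfl, _⟩
        · exact List.mem_append_left _ h
        · simp
      · rintro ⟨hA, h⟩
        refine ⟨hA, ?_⟩
        rcases List.mem_append.mp h with h | h
        · exact Or.inl h
        · rcases List.mem_singleton.mp h with rfl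
          refine Or.inr ⟨rfl, ?_⟩
          -- a state A colors lies in S
          apply pv_fold_dom (pvStepA g colors) (pv_stepA_dom g colors) S PySem.Dict.empty t
          rw [hA, PySem.Dict.get?_empty]
          simp
    have hP' : PySem.List.sorted (PySem.Set.ofList colors) (fun c => c) false = (l₁ ++ [p]) ++ r := by
      rw [hP, List.append_assoc]; rfl
    intro t v
    rw [List.foldl_cons, ih (l₁ ++ [p]) (pvPassB g S cm p) hP' hstep t v]
    have hmm : (l₁ ++ [p]) ++ r = l₁ ++ p :: r := by simp
    rw [hmm]

-- B's final dict agrees with A's final dict on every lookup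
theorem pv_lookup_eq (g : PySem.Dict String (List String)) (colors : List String)
    (S : List String) (hndS : S.Nodup) (t : String) :
    ((PySem.List.sorted (PySem.Set.ofList colors) (fun c => c) false).foldl
        (pvPassB g S) PySem.Dict.empty).get? t
      = (S.foldl (pvStepA g colors) PySem.Dict.empty).get? t := by
  have h := pv_outer g colors S hndS
    (PySem.List.sorted (PySem.Set.ofList colors) (fun c => c) false) [] PySem.Dict.empty
    (by simp) (by intro t v; simp [PySem.Dict.get?_empty])
  cases hA : (S.foldl (pvStepA g colors) PySem.Dict.empty).get? t with
  | some v =>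
    have hv : v ∈ colors := by
      rcases pv_foldA_values g colors S PySem.Dict.empty t v hA with h2 | h2
      · rw [PySem.Dict.get?_empty] at h2; cases h2
      · exact h2
    have hvP : v ∈ PySem.List.sorted (PySem.Set.ofList colors) (fun c => c) false := by
      rw [PySem.List.mem_sorted, PySem.Set.mem_ofList]; exact hv
    exact (h t v).mpr ⟨hA, by simpa using hvP⟩
  | none =>
    cases hB : ((PySem.List.sorted (PySem.Set.ofList colors) (fun c => c) false).foldl
        (pvPassB g S) PySem.Dict.empty).get? t with
    | none => rfl
    | some v =>
      have := ((h t v).mp hB).1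
      rw [hA] at this; cases this

-- ===== items of the two final dicts =====

-- A's fold appends exactly the colored states, in processing order
theorem pv_itemsA (g : PySem.Dict String (List String)) (colors : List String) :
    ∀ (l : List String) (cm : PySem.Dict String String), l.Nodup →
      (∀ s ∈ l, cm.get? s = none) →
      (l.foldl (pvStepA g colors) cm).items
        = cm.items ++ l.filterMap (fun s => ((l.foldl (pvStepA g colors) cm).get? s).map ((s, ·))) := by
  intro l
  induction l with
  | nil => intro cm _ _; simp
  | cons s r ih =>
    intro cm hnd hnone
    obtain ⟨hsr, hndr⟩ := List.nodup_cons.mp hnd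
    have hs : cm.get? s = none := hnone s List.mem_cons_self
    have hnone' : ∀ u ∈ r, (pvStepA g colors cm s).get? u = none := by
      intro u hu
      rw [pv_stepA_stable g colors cm s u (fun h => hsr (h ▸ hu)), hnone u (List.mem_cons_of_mem s hu)]
    rw [List.foldl_cons, ih (pvStepA g colors cm s) hndr hnone', List.filterMap_cons]
    have hgets : (r.foldl (pvStepA g colors) (pvStepA g colors cm s)).get? s
        = (pvStepA g colors cm s).get? s :=
      pv_fold_stable (pvStepA g colors) (pv_stepA_stable g colors) r _ s hsr
    rw [hgets]
    cases hm : PySem.List.min? (pvAvailA g colors cm s) (fun c => c) with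
    | some m =>
      have h1 : pvStepA g colors cm s = cm.insert s m := by rw [pvStepA, hm]
      have hcontains : cm.contains s = false := by
        rw [PySem.Dict.contains_eq_isSome_get?, hs]; rfl
      rw [h1, PySem.Dict.get?_insert_self, PySem.Dict.items_insert_of_not_contains cm m hcontains]
      simp [List.append_assoc]
    | none =>
      have h1 : pvStepA g colors cm s = cm := by rw [pvStepA, hm]
      rw [h1, hs]
      rfl

-- B's rebuilding fold appends exactly the colored states, in state order
theorem pv_itemsB (cmW : PySem.Dict String String) :
    ∀ (l : List String) (d : PySem.Dict String String), l.Nodup →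
      (∀ s ∈ l, d.contains s = false) →
      (l.foldl (fun d s =>
          match PySem.Dict.get? cmW s with
          | some c => PySem.Dict.insert d s c
          | none => d) d).items
        = d.items ++ l.filterMap (fun s => (cmW.get? s).map ((s, ·))) := by
  intro l
  induction l with
  | nil => intro d _ _; simp
  | cons s r ih =>
    intro d hnd hno
    obtain ⟨hsr, hndr⟩ := List.nodup_cons.mp hnd
    rw [List.foldl_cons, List.filterMap_cons]
    cases hm : PySem.Dict.get? cmW s with
    | some c =>
      have hno' : ∀ u ∈ r, (d.insert s c).contains u = false := by
        intro u hu
        rw [PySem.Dict.contains_insert]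
        have hne : (u == s) = false := by
          simp only [beq_eq_false_iff_ne]; exact fun h => hsr (h ▸ hu)
        rw [hne, hno u (List.mem_cons_of_mem s hu)]; rfl
      dsimp only
      rw [ih (d.insert s c) hndr hno',
        PySem.Dict.items_insert_of_not_contains d c (hno s List.mem_cons_self)]
      simp [List.append_assoc]
    | none =>
      dsimp only
      rw [ih d hndr (fun u hu => hno u (List.mem_cons_of_mem s hu))]
      rfl

-- ===== VERDICT (by name: the statement is the Claim_ definition above) =====
theorem greedy_state_algorithm_spec : Claim_equal_greedy_state_algorithm := by
  intro graph colors _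
  show _ = _
  simp only [greedy_state_algorithm, greedy_state_algorithm_alt]
  set g := PySem.Dict.ofList graph with hg
  set S := PySem.List.sorted (PySem.Dict.keys g) (fun s => -((PySem.Dict.getD g s []).length : Int)) false with hSdef
  have hndS : S.Nodup := by
    have hperm := PySem.List.sorted_perm (PySem.Dict.keys g) (fun s => -((PySem.Dict.getD g s []).length : Int)) false
    exact hperm.nodup_iff.mpr (PySem.Dict.nodup_keys_ofList graph)
  set cmW := (PySem.List.sorted (PySem.Set.ofList colors) (fun c => c) false).foldl (pvPassB g S) PySem.Dict.empty with hcmW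
  rw [pv_itemsA g colors S PySem.Dict.empty hndS (fun s _ => PySem.Dict.get?_empty s),
    pv_itemsB cmW S PySem.Dict.empty hndS (fun s _ => PySem.Dict.contains_empty s)]
  have hfun : ∀ s ∈ S, ((S.foldl (pvStepA g colors) PySem.Dict.empty).get? s).map (fun c => (s, c))
      = (cmW.get? s).map (fun c => (s, c)) := by
    intro s _
    rw [hcmW, pv_lookup_eq g colors S hndS s]
  rw [List.filterMap_congr hfun]
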